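-- pv_equiv track=rewrite | github.com/definitelynotrussellkirk-bit/binarySKILL | generators/permutations.py | count_k_permutations
-- ===== SOURCE A (Python) =====
-- def count_k_permutations(n: int, k: int) -> int:
--     """
--     Count k-permutations (arrangements) using falling factorial.
--
--     P(n, k) = n × (n-1) × ... × (n-k+1) = n! / (n-k)!
--
--     Args:
--         n: Size of universe
--         k: Number of elements to arrange
--
--     Returns:
--         P(n, k)
--
--     Examples:
--         >>> count_k_permutations(10, 4)
--         5040
--         >>> count_k_permutations(5, 2)
--         20
--         >>> count_k_permutations(7, 7)
--         5040
--         >>> count_k_permutations(5, 0)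
--         1
--     """
--     if k > n or k < 0 or n < 0:
--         return 0
--     if k == 0:
--         return 1
--
--     # Compute falling factorial: n × (n-1) × ... × (n-k+1)
--     result = 1
--     for i in range(n, n - k, -1):
--         result *= i
--     return result
-- ===== SOURCE B (Python) =====
-- def _prod(lo: int, hi: int) -> int:
--     """Product of the integers in [lo, hi]; 1 if the interval is empty."""
--     if lo > hi:
--         return 1
--     if lo == hi:
--         return lo
--     mid = (lo + hi) // 2
--     return _prod(lo, mid) * _prod(mid + 1, hi)
--
-- def count_k_permutations(n: int, k: int) -> int:
--     if k > n or k < 0 or n < 0: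
--         return 0
--     return _prod(n - k + 1, n)
-- ===== Notes on version B (the rewrite author's own statement) =====
-- stated objective: alternative
-- what changed: Replaces A's left-to-right falling-factorial loop with a divide-and-conquer balanced product of the interval [n-k+1, n], which also makes the separate k == 0 special case unnecessary.
import Mathlib
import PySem

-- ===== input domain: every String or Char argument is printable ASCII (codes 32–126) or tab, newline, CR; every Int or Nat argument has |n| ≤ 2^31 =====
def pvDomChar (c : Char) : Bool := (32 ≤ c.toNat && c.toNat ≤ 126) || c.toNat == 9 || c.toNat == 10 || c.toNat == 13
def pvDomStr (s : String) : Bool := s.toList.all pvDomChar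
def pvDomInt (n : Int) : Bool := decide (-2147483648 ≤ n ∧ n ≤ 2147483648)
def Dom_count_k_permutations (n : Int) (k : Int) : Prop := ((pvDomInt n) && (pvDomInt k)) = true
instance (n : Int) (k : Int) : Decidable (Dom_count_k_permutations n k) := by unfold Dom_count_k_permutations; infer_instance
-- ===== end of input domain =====

-- B computes the same count by a divide-and-conquer balanced product of the interval
-- [n-k+1, n] instead of A's left-to-right falling-factorial loop, with no k == 0 special case.

-- ===== PORT A =====
def count_k_permutations (n : Int) (k : Int) : Int :=
  if k > n ∨ k < 0 ∨ n < 0 then 0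
  else if k = 0 then 1
  else (PySem.List.pyRange n (n - k) (-1)).foldl (fun result i => result * i) 1

-- ===== PORT B =====
-- helper _prod of Source B: divide-and-conquer product of the integers in [lo, hi]
def bprod (lo hi : Int) : Int :=
  if lo > hi then 1
  else if lo = hi then lo
  else
    let mid := PySem.Int.floordiv (lo + hi) 2
    bprod lo mid * bprod (mid + 1) hi
termination_by (hi - lo).toNat
decreasing_by
  · have h := PySem.Int.floordiv_two_mid_bounds (lo := lo) (hi := hi) (by omega)
    have h2 : PySem.Int.floordiv (lo + hi) 2 < hi :=
      (PySem.Int.floordiv_lt_iff_lt_mul (by omega)).mpr (by omega)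
    omega
  · have h := PySem.Int.floordiv_two_mid_bounds (lo := lo) (hi := hi) (by omega)
    omega

def count_k_permutations_alt (n : Int) (k : Int) : Int :=
  if k > n ∨ k < 0 ∨ n < 0 then 0
  else bprod (n - k + 1) n

-- ===== PRECONDITION & SPEC =====
def Spec_count_k_permutations (n : Int) (k : Int) (out : Int) : Prop := out = count_k_permutations_alt n k
instance (n : Int) (k : Int) (out : Int) : Decidable (Spec_count_k_permutations n k out) := by unfold Spec_count_k_permutations; infer_instance

-- ===== CLAIM (what is proved, stated in full; the proofs are below) =====
def Claim_equal_count_k_permutations : Prop := ∀ (n : Int) (k : Int), Dom_count_k_permutations n k → Spec_count_k_permutations n k (count_k_permutations n k)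

-- ===== LEMMAS AND PROOFS =====

-- bprod lo hi is the product of the list pyRange lo (hi+1) 1
theorem bprod_eq_prod_aux (d : Nat) : ∀ (lo hi : Int), (hi - lo).toNat ≤ d →
    bprod lo hi = (PySem.List.pyRange lo (hi + 1) 1).prod := by
  induction d with
  | zero =>
    intro lo hi hd
    rw [bprod]
    by_cases h1 : lo > hi
    · rw [if_pos h1, PySem.List.pyRange_one_eq_nil (by omega), List.prod_nil]
    · have h2 : lo = hi := by omega
      rw [if_neg h1, if_pos h2, h2, PySem.List.pyRange_one_singleton]
      simp
  | succ d ih =>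
    intro lo hi hd
    rw [bprod]
    by_cases h1 : lo > hi
    · rw [if_pos h1, PySem.List.pyRange_one_eq_nil (by omega), List.prod_nil]
    · rw [if_neg h1]
      by_cases h2 : lo = hi
      · rw [if_pos h2, h2, PySem.List.pyRange_one_singleton]
        simp
      · rw [if_neg h2]
        have hm := PySem.Int.floordiv_two_mid_bounds (lo := lo) (hi := hi) (by omega)
        have hlt : PySem.Int.floordiv (lo + hi) 2 < hi :=
          (PySem.Int.floordiv_lt_iff_lt_mul (by omega)).mpr (by omega)
        set mid := PySem.Int.floordiv (lo + hi) 2 with hmid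
        show bprod lo mid * bprod (mid + 1) hi = _
        rw [ih lo mid (by omega), ih (mid + 1) hi (by omega)]
        rw [PySem.List.pyRange_one_append lo (mid + 1) (hi + 1) (by omega) (by omega)]
        rw [List.prod_append]

theorem bprod_eq_prod (lo hi : Int) : bprod lo hi = (PySem.List.pyRange lo (hi + 1) 1).prod :=
  bprod_eq_prod_aux (hi - lo).toNat lo hi le_rfl

theorem foldl_mul_eq_prod (l : List Int) : l.foldl (fun r i => r * i) 1 = l.prod := by
  rw [List.prod_eq_foldl]

-- ===== VERDICT (by name: the statement is the Claim_ definition above) =====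
theorem count_k_permutations_spec : Claim_equal_count_k_permutations := by
  intro n k _
  unfold Spec_count_k_permutations count_k_permutations count_k_permutations_alt
  by_cases hg : k > n ∨ k < 0 ∨ n < 0
  · simp [hg]
  · simp only [if_neg hg]
    push Not at hg
    obtain ⟨h1, h2, h3⟩ := hg
    rw [bprod_eq_prod]
    by_cases hk : k = 0
    · subst hk
      simp only [if_true]
      rw [PySem.List.pyRange_one_eq_nil (by omega), List.prod_nil]
    · rw [if_neg hk]
      rw [foldl_mul_eq_prod]
      rw [PySem.List.pyRange_neg_one_eq_reverse, List.prod_reverse]
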